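-- pv_equiv track=rewrite | github.com/pypi-data/pypi-mirror-404 | packages/talentsavvy-improveteam/talentsavvy_improveteam-0.34.85-py3-none-any.whl/extract_jira.py | select_best_sprint
-- ===== SOURCE A (Python) =====
-- def select_best_sprint(sprint_ids, sprint_names, sprint_details_map):
--     """
--     Select the best sprint when multiple sprints are present.
--     Priority: 1) Active sprint, 2) Future sprint, 3) Latest completeDate, 4) Last in list
--
--     Args:
--         sprint_ids: List of sprint IDs
--         sprint_names: List of sprint names (same order as sprint_ids)
--         sprint_details_map: Dict mapping sprint_id -> {name, state, completeDate, endDate}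
--
--     Returns:
--         Tuple of (sprint_id, sprint_name) - single sprint ID string and name string
--     """
--     if not sprint_ids:
--         return '', ''
--     if len(sprint_ids) == 1:
--         return sprint_ids[0], sprint_names[0]
--
--     sprint_pairs = list(zip(sprint_ids, sprint_names))
--
--     # Priority 1: Active sprint
--     for sid, sname in sprint_pairs:
--         details = sprint_details_map.get(sid, {})
--         if details.get('state') == 'active':
--             return sid, sname
--
--     # Priority 2: Future sprint
--     for sid, sname in sprint_pairs:
--         details = sprint_details_map.get(sid, {})
--         if details.get('state') == 'future':
--             return sid, sname
--
--     # Priority 3: Latest completeDate among closed sprints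
--     best_pair = None
--     latest_date = None
--     for sid, sname in sprint_pairs:
--         details = sprint_details_map.get(sid, {})
--         complete_date = details.get('completeDate')
--         if complete_date:
--             if latest_date is None or complete_date > latest_date:
--                 latest_date = complete_date
--                 best_pair = (sid, sname)
--
--     if best_pair:
--         return best_pair[0], best_pair[1]
--
--     # Fallback: Last sprint in list (index -1)
--     return sprint_ids[-1], sprint_names[-1]
-- ===== SOURCE B (Python) =====
-- def select_best_sprint(sprint_ids, sprint_names, sprint_details_map):
--     """Single keyed pass: best-by-(rank, completeDate) with strict update keeps first on ties."""
--     if not sprint_ids: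
--         return '', ''
--     if len(sprint_ids) == 1:
--         return sprint_ids[0], sprint_names[0]
--     best = None  # (key, (sid, sname)); key = (rank, date)
--     for sid, sname in zip(sprint_ids, sprint_names):
--         details = sprint_details_map.get(sid, {})
--         state = details.get('state')
--         if state == 'active':
--             key = (3, '')
--         elif state == 'future':
--             key = (2, '')
--         else:
--             cd = details.get('completeDate')
--             if not cd:
--                 continue
--             key = (1, cd)
--         if best is None or key > best[0]:
--             best = (key, (sid, sname))
--     if best is not None:
--         return best[1]
--     return sprint_ids[-1], sprint_names[-1]
-- ===== Notes on version B (the rewrite author's own statement) =====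
-- stated objective: faster
-- what changed: A's three sequential scans (find first active, find first future, then a latest-completeDate loop) are merged into one keyed pass that keeps the best sprint by key (rank, completeDate) with strict-greater updates so the first maximal element wins.
import Mathlib
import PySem

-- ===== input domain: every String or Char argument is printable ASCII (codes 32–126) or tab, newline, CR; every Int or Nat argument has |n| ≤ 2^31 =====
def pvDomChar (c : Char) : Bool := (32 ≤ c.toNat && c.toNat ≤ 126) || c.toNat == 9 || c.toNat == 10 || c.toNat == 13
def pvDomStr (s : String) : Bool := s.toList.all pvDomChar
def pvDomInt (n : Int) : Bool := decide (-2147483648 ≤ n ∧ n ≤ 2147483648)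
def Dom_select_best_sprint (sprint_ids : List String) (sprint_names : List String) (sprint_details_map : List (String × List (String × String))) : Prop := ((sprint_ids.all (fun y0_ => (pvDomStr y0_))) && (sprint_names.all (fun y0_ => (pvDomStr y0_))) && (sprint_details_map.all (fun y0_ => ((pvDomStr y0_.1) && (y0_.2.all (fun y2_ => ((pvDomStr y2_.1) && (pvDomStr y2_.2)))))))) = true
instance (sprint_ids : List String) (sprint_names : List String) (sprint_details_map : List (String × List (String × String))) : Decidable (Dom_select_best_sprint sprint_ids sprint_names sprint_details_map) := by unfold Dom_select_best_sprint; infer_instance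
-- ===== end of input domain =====

-- B replaces A's three sequential scans by ONE keyed pass (best-by-(rank, completeDate), strict
-- update so the first maximal element wins); equivalence is about the return value (no mutation).

-- ===== PORT A =====
-- sprint_details_map.get(sid, {})
def pvDetails (m : List (String × List (String × String))) (sid : String) : List (String × String) :=
  ((PySem.Dict.mk m).get? sid).getD []

-- details.get('state') == s
def pvStateIs (m : List (String × List (String × String))) (sid : String) (s : String) : Bool :=
  (PySem.Dict.mk (pvDetails m sid)).get? "state" == some s

-- one step of A's priority-3 loop; state = (latest_date, best_pair)
def pvStep3 (m : List (String × List (String × String)))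
    (st : Option String × Option (String × String)) (p : String × String) :
    Option String × Option (String × String) :=
  match (PySem.Dict.mk (pvDetails m p.1)).get? "completeDate" with
  | none => st
  | some cd =>
    if cd = "" then st          -- falsy completeDate
    else
      match st.1 with
      | none => (some cd, some p)
      | some d =>               -- complete_date > latest_date (Python str '>' = code-point lex)
        if PySem.Chars.strLt d.toList cd.toList then (some cd, some p) else st

def select_best_sprint (sprint_ids : List String) (sprint_names : List String) (sprint_details_map : List (String × List (String × String))) : String × String :=
  if sprint_ids = [] then ("", "")
  else if sprint_ids.length = 1 then
    ((PySem.List.pyGet? sprint_ids 0).getD "", (PySem.List.pyGet? sprint_names 0).getD "")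
  else
    match (sprint_ids.zip sprint_names).find? (fun p => pvStateIs sprint_details_map p.1 "active") with
    | some p => p
    | none =>
      match (sprint_ids.zip sprint_names).find? (fun p => pvStateIs sprint_details_map p.1 "future") with
      | some p => p
      | none =>
        match ((sprint_ids.zip sprint_names).foldl (pvStep3 sprint_details_map) (none, none)).2 with
        | some p => p
        | none =>
          ((PySem.List.pyGet? sprint_ids (-1)).getD "", (PySem.List.pyGet? sprint_names (-1)).getD "")

-- ===== PORT B =====
-- priority key of one sprint: (3,'') active, (2,'') future, (1,completeDate) closed, none skipped
def pvKeyOf (m : List (String × List (String × String))) (sid : String) : Option (Int × List Char) :=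
  let details := pvDetails m sid
  let st := (PySem.Dict.mk details).get? "state"
  if st == some "active" then some (3, [])
  else if st == some "future" then some (2, [])
  else
    match (PySem.Dict.mk details).get? "completeDate" with
    | none => none
    | some cd => if cd = "" then none else some (1, cd.toList)

-- Python tuple comparison key > best_key (strict, lexicographic)
def pvKeyGt (a b : Int × List Char) : Bool := decide (b.1 < a.1 ∨ (b.1 = a.1 ∧ b.2 < a.2))

-- one step of B's single pass; state = best = (key, (sid, sname)) or None
def pvStepB (m : List (String × List (String × String)))
    (acc : Option ((Int × List Char) × (String × String))) (p : String × String) :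
    Option ((Int × List Char) × (String × String)) :=
  match pvKeyOf m p.1 with
  | none => acc
  | some k =>
    match acc with
    | none => some (k, p)
    | some b => if pvKeyGt k b.1 then some (k, p) else acc

def select_best_sprint_alt (sprint_ids : List String) (sprint_names : List String) (sprint_details_map : List (String × List (String × String))) : String × String :=
  if sprint_ids = [] then ("", "")
  else if sprint_ids.length = 1 then
    ((PySem.List.pyGet? sprint_ids 0).getD "", (PySem.List.pyGet? sprint_names 0).getD "")
  else
    match (sprint_ids.zip sprint_names).foldl (pvStepB sprint_details_map) none with
    | some b => b.2
    | none =>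
      ((PySem.List.pyGet? sprint_ids (-1)).getD "", (PySem.List.pyGet? sprint_names (-1)).getD "")

-- ===== PRECONDITION & SPEC =====
-- Pre_ excludes only the inputs where Python A raises IndexError: a nonempty sprint_ids with an
-- empty sprint_names (sprint_names[0] / sprint_names[-1] fails there; B raises identically).
def Pre_select_best_sprint (sprint_ids : List String) (sprint_names : List String) (sprint_details_map : List (String × List (String × String))) : Prop :=
  sprint_ids ≠ [] → sprint_names ≠ []
instance (sprint_ids : List String) (sprint_names : List String) (sprint_details_map : List (String × List (String × String))) : Decidable (Pre_select_best_sprint sprint_ids sprint_names sprint_details_map) := by unfold Pre_select_best_sprint; infer_instance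

def pvWitness_select_best_sprint : List String × List String × (List (String × List (String × String))) :=
  (["10", "11"], ["Sprint 10", "Sprint 11"],
   [("10", [("state", "closed"), ("completeDate", "2024-01-05")]),
    ("11", [("state", "closed"), ("completeDate", "2024-02-05")])])

def Spec_select_best_sprint (sprint_ids : List String) (sprint_names : List String) (sprint_details_map : List (String × List (String × String))) (out : String × String) : Prop := out = select_best_sprint_alt sprint_ids sprint_names sprint_details_map
instance (sprint_ids : List String) (sprint_names : List String) (sprint_details_map : List (String × List (String × String))) (out : String × String) : Decidable (Spec_select_best_sprint sprint_ids sprint_names sprint_details_map out) := by unfold Spec_select_best_sprint; infer_instance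

-- ===== CLAIM (what is proved, stated in full; the proofs are below) =====
def Claim_equal_select_best_sprint : Prop := ∀ (sprint_ids : List String) (sprint_names : List String) (sprint_details_map : List (String × List (String × String))), Dom_select_best_sprint sprint_ids sprint_names sprint_details_map → Pre_select_best_sprint sprint_ids sprint_names sprint_details_map → Spec_select_best_sprint sprint_ids sprint_names sprint_details_map (select_best_sprint sprint_ids sprint_names sprint_details_map)

-- ===== LEMMAS AND PROOFS =====

-- generic "keep the earlier element unless the later one is strictly greater" combiner
def pvMerge {K A : Type} (gt : K → K → Bool) :
    Option (K × A) → Option (K × A) → Option (K × A)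
  | none, r => r
  | some c, none => some c
  | some c, some r => if gt r.1 c.1 then some r else some c

def pvBestOf {K A P : Type} (gt : K → K → Bool) (cand : P → Option (K × A)) :
    List P → Option (K × A)
  | [] => none
  | p :: rest => pvMerge gt (cand p) (pvBestOf gt cand rest)

theorem pvMerge_none_right {K A : Type} (gt : K → K → Bool) (x : Option (K × A)) :
    pvMerge gt x none = x := by cases x <;> rfl

theorem pvMerge_assoc {K A : Type} (gt : K → K → Bool)
    (htrans : ∀ a b c, gt a b = true → gt b c = true → gt a c = true)
    (hntrans : ∀ a b c, gt a b = false → gt b c = false → gt a c = false)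
    (x y z : Option (K × A)) :
    pvMerge gt (pvMerge gt x y) z = pvMerge gt x (pvMerge gt y z) := by
  cases x with
  | none => rfl
  | some cx =>
    cases y with
    | none => rfl
    | some cy =>
      cases z with
      | none => rw [pvMerge_none_right, pvMerge_none_right]
      | some cz =>
        cases h1 : gt cy.1 cx.1 <;> cases h2 : gt cz.1 cy.1
        · have h3 := hntrans _ _ _ h2 h1
          simp [pvMerge, h1, h2, h3]
        · simp [pvMerge, h1, h2]
        · simp [pvMerge, h1, h2]
        · have h3 := htrans _ _ _ h2 h1
          simp [pvMerge, h1, h2, h3]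

theorem pvFoldl_merge {K A P : Type} (gt : K → K → Bool) (cand : P → Option (K × A))
    (htrans : ∀ a b c, gt a b = true → gt b c = true → gt a c = true)
    (hntrans : ∀ a b c, gt a b = false → gt b c = false → gt a c = false) :
    ∀ (l : List P) (b : Option (K × A)),
      List.foldl (fun acc p => pvMerge gt acc (cand p)) b l = pvMerge gt b (pvBestOf gt cand l) := by
  intro l
  induction l with
  | nil => intro b; simp [pvBestOf, pvMerge_none_right]
  | cons p rest ih =>
    intro b
    simp only [List.foldl_cons, pvBestOf]
    rw [ih, pvMerge_assoc gt htrans hntrans]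

-- order facts for the two keys
theorem pvKeyGt_trans : ∀ a b c, pvKeyGt a b = true → pvKeyGt b c = true → pvKeyGt a c = true := by
  intro a b c h1 h2
  simp only [pvKeyGt, decide_eq_true_eq] at *
  rcases h1 with h1 | ⟨he1, hl1⟩ <;> rcases h2 with h2 | ⟨he2, hl2⟩
  · exact Or.inl (by omega)
  · exact Or.inl (by omega)
  · exact Or.inl (by omega)
  · exact Or.inr ⟨by omega, lt_trans hl2 hl1⟩

theorem pvKeyGt_ntrans : ∀ a b c, pvKeyGt a b = false → pvKeyGt b c = false → pvKeyGt a c = false := by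
  intro a b c h1 h2
  simp only [pvKeyGt, decide_eq_false_iff_not, not_or, not_and] at *
  obtain ⟨h1a, h1b⟩ := h1
  obtain ⟨h2a, h2b⟩ := h2
  constructor
  · omega
  · intro he hl
    have he1 : b.1 = a.1 := by omega
    have he2 : c.1 = b.1 := by omega
    have hab : a.2 ≤ b.2 := not_lt.mp (h1b he1)
    have hbc : b.2 ≤ c.2 := not_lt.mp (h2b he2)
    exact absurd (lt_of_lt_of_le hl (le_trans hab hbc)) (lt_irrefl _)

def pvDGt (a b : String) : Bool := PySem.Chars.strLt b.toList a.toList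

theorem pvDGt_trans : ∀ a b c, pvDGt a b = true → pvDGt b c = true → pvDGt a c = true := by
  intro a b c h1 h2
  simp only [pvDGt, PySem.Chars.strLt, decide_eq_true_eq] at *
  exact lt_trans h2 h1

theorem pvDGt_ntrans : ∀ a b c, pvDGt a b = false → pvDGt b c = false → pvDGt a c = false := by
  intro a b c h1 h2
  simp only [pvDGt, PySem.Chars.strLt, decide_eq_false_iff_not] at *
  exact fun h => h2 (lt_of_lt_of_le h (not_lt.mp h1))

-- candidate views of one (sid, sname) pair
def pvCandB (m : List (String × List (String × String))) (p : String × String) :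
    Option ((Int × List Char) × (String × String)) :=
  (pvKeyOf m p.1).map (fun k => (k, p))

def pvCandA (m : List (String × List (String × String))) (p : String × String) :
    Option (String × (String × String)) :=
  match (PySem.Dict.mk (pvDetails m p.1)).get? "completeDate" with
  | none => none
  | some cd => if cd = "" then none else some (cd, p)

theorem pvCandB_active (m : List (String × List (String × String))) (p : String × String)
    (ha : pvStateIs m p.1 "active" = true) :
    pvCandB m p = some (((3 : Int), ([] : List Char)), p) := by
  simp only [pvStateIs] at ha
  simp [pvCandB, pvKeyOf, ha]

theorem pvCandB_future (m : List (String × List (String × String))) (p : String × String)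
    (ha : pvStateIs m p.1 "active" = false) (hf : pvStateIs m p.1 "future" = true) :
    pvCandB m p = some (((2 : Int), ([] : List Char)), p) := by
  simp only [pvStateIs] at ha hf
  simp [pvCandB, pvKeyOf, ha, hf]

theorem pvCandB_other (m : List (String × List (String × String))) (p : String × String)
    (ha : pvStateIs m p.1 "active" = false) (hf : pvStateIs m p.1 "future" = false) :
    pvCandB m p = Option.map (fun dp => (((1 : Int), dp.1.toList), dp.2)) (pvCandA m p) := by
  simp only [pvStateIs] at ha hf
  simp only [pvCandB, pvKeyOf, pvCandA, ha, hf, Bool.false_eq_true, if_false, reduceIte]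
  cases (PySem.Dict.mk (pvDetails m p.1)).get? "completeDate" with
  | none => rfl
  | some cd => by_cases hcd : cd = "" <;> simp [hcd]

theorem pvStepB_eq (m : List (String × List (String × String))) :
    pvStepB m = fun acc p => pvMerge pvKeyGt acc (pvCandB m p) := by
  funext acc p
  simp only [pvStepB, pvCandB]
  cases h : pvKeyOf m p.1 with
  | none => simp [pvMerge_none_right]
  | some k => cases acc <;> simp [pvMerge]

def pvPack : Option (String × (String × String)) → Option String × Option (String × String)
  | none => (none, none)
  | some dp => (some dp.1, some dp.2)

theorem pvStep3_pack (m : List (String × List (String × String)))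
    (b : Option (String × (String × String))) (p : String × String) :
    pvStep3 m (pvPack b) p = pvPack (pvMerge pvDGt b (pvCandA m p)) := by
  simp only [pvStep3, pvCandA]
  cases h : (PySem.Dict.mk (pvDetails m p.1)).get? "completeDate" with
  | none => simp [pvMerge_none_right]
  | some cd =>
    by_cases hcd : cd = ""
    · simp [hcd, pvMerge_none_right]
    · simp only [hcd, Bool.false_eq_true, if_false, reduceIte]
      cases b with
      | none => rfl
      | some dp =>
        by_cases hlt : dp.1.toList < cd.toList <;>
          simp [pvPack, pvMerge, pvDGt, PySem.Chars.strLt, hlt]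

theorem pvFoldl3_pack (m : List (String × List (String × String))) :
    ∀ (l : List (String × String)) (b : Option (String × (String × String))),
      List.foldl (pvStep3 m) (pvPack b) l =
        pvPack (List.foldl (fun acc p => pvMerge pvDGt acc (pvCandA m p)) b l) := by
  intro l
  induction l with
  | nil => intro b; rfl
  | cons p rest ih => intro b; simp only [List.foldl_cons, pvStep3_pack, ih]

-- the characterisation: B's single-pass best equals A's three-pass selection
theorem pvChar (m : List (String × List (String × String))) :
    ∀ pairs : List (String × String),
      pvBestOf pvKeyGt (pvCandB m) pairs =
        match pairs.find? (fun p => pvStateIs m p.1 "active") with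
        | some p => some (((3 : Int), ([] : List Char)), p)
        | none =>
          match pairs.find? (fun p => pvStateIs m p.1 "future") with
          | some p => some (((2 : Int), ([] : List Char)), p)
          | none =>
            Option.map (fun dp => (((1 : Int), dp.1.toList), dp.2))
              (pvBestOf pvDGt (pvCandA m) pairs) := by
  intro pairs
  induction pairs with
  | nil => rfl
  | cons p rest ih =>
    simp only [pvBestOf]
    cases ha : pvStateIs m p.1 "active" with
    | true =>
      rw [pvCandB_active m p ha, ih,
        List.find?_cons_of_pos (p := fun q : String × String => pvStateIs m q.1 "active") (by simpa using ha)]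
      cases hfa : rest.find? (fun p => pvStateIs m p.1 "active") with
      | some q => simp [pvMerge, pvKeyGt]
      | none =>
        simp only [hfa]
        cases hff : rest.find? (fun p => pvStateIs m p.1 "future") with
        | some q => simp [pvMerge, pvKeyGt]
        | none =>
          simp only [hff]
          cases hb : pvBestOf pvDGt (pvCandA m) rest with
          | none => rfl
          | some dp => simp [pvMerge, pvKeyGt]
    | false =>
      rw [List.find?_cons_of_neg (p := fun q : String × String => pvStateIs m q.1 "active") (by simp [ha])]
      cases hf : pvStateIs m p.1 "future" with
      | true =>
        rw [pvCandB_future m p ha hf, ih,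
          List.find?_cons_of_pos (p := fun q : String × String => pvStateIs m q.1 "future") (by simpa using hf)]
        cases hfa : rest.find? (fun p => pvStateIs m p.1 "active") with
        | some q => simp [pvMerge, pvKeyGt]
        | none =>
          simp only [hfa]
          cases hff : rest.find? (fun p => pvStateIs m p.1 "future") with
          | some q => simp [pvMerge, pvKeyGt]
          | none =>
            simp only [hff]
            cases hb : pvBestOf pvDGt (pvCandA m) rest with
            | none => rfl
            | some dp => simp [pvMerge, pvKeyGt]
      | false =>
        rw [pvCandB_other m p ha hf, ih,
          List.find?_cons_of_neg (p := fun q : String × String => pvStateIs m q.1 "future") (by simp [hf])]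
        cases hfa : rest.find? (fun p => pvStateIs m p.1 "active") with
        | some q =>
          cases hc : pvCandA m p with
          | none => rfl
          | some dp => simp [pvMerge, pvKeyGt]
        | none =>
          simp only [hfa]
          cases hff : rest.find? (fun p => pvStateIs m p.1 "future") with
          | some q =>
            cases hc : pvCandA m p with
            | none => rfl
            | some dp => simp [pvMerge, pvKeyGt]
          | none =>
            simp only [hff]
            cases hc : pvCandA m p with
            | none =>
              simp only [Option.map_none]
              cases hb : pvBestOf pvDGt (pvCandA m) rest <;> rfl
            | some dp =>
              cases hb : pvBestOf pvDGt (pvCandA m) rest with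
              | none => rfl
              | some dq =>
                by_cases hlt : dp.1.toList < dq.1.toList <;>
                  simp [pvMerge, pvKeyGt, pvDGt, PySem.Chars.strLt, hlt]

-- ===== VERDICT (by name: the statement is the Claim_ definition above) =====
theorem select_best_sprint_spec : Claim_equal_select_best_sprint := by
  intro ids names m _ _
  unfold Spec_select_best_sprint select_best_sprint select_best_sprint_alt
  by_cases h0 : ids = []
  · simp [h0]
  · by_cases h1 : ids.length = 1
    · simp [h0, h1]
    · simp only [h0, h1, Bool.false_eq_true, if_false, reduceIte]
      rw [pvStepB_eq m,
        pvFoldl_merge pvKeyGt (pvCandB m) pvKeyGt_trans pvKeyGt_ntrans (ids.zip names) none]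
      have hA : (ids.zip names).foldl (pvStep3 m) (none, none) =
          pvPack (pvBestOf pvDGt (pvCandA m) (ids.zip names)) := by
        have h := pvFoldl3_pack m (ids.zip names) none
        rw [pvFoldl_merge pvDGt (pvCandA m) pvDGt_trans pvDGt_ntrans (ids.zip names) none] at h
        exact h
      rw [hA, pvChar m (ids.zip names)]
      cases hfa : (ids.zip names).find? (fun p => pvStateIs m p.1 "active") with
      | some q => rfl
      | none =>
        cases hff : (ids.zip names).find? (fun p => pvStateIs m p.1 "future") with
        | some q => rfl
        | none =>
          cases hb : pvBestOf pvDGt (pvCandA m) (ids.zip names) with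
          | none => rfl
          | some dp => rfl
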